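-- pv_equiv track=rewrite | github.com/thedemons/opentele | src/td/storage.py | ToFilePart
-- ===== SOURCE A (Python) =====
-- def ToFilePart(val: int):
--     result = str()
--     for i in range(0, 0x10):
--         v = val & 0xF
--         if v < 0x0A:
--             result += chr(ord("0") + v)
--         else:
--             result += chr(ord("A") + (v - 0x0A))
--         val >>= 4
--     return result
-- ===== SOURCE B (Python) =====
-- def ToFilePart(val: int):
--     return format(val & 0xFFFFFFFFFFFFFFFF, '016X')[::-1]
-- ===== Notes on version B (the rewrite author's own statement) =====
-- stated objective: idiomatic
-- what changed: Replaces the manual 16-iteration per-nibble chr/ord loop with a closed-form conversion: mask to 64 bits, let Python's built-in zero-padded uppercase hex formatting produce the digits most-significant-first, and reverse the string.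
import Mathlib
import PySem

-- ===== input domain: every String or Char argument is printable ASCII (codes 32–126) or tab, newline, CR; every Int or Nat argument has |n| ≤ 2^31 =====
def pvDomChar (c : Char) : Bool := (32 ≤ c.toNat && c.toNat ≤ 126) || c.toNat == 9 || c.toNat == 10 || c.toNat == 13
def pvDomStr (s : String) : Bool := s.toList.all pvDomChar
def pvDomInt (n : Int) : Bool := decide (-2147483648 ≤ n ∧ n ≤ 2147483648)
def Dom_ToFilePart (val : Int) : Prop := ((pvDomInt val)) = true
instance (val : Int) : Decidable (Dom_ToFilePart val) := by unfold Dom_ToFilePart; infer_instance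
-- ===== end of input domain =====

-- B replaces A's manual per-nibble chr/ord loop with a closed-form conversion:
-- mask to 64 bits, format as a 16-digit uppercase hex string (MSB first) and reverse it.

-- ===== PORT A =====
-- result is a list of chars; String.mk at the end ('str' built by '+='); exact.
def ToFilePart (val : Int) : String :=
  let st := (PySem.List.pyRange 0 16 1).foldl
    (fun (st : List Char × Int) _ =>
      -- v = val & 0xF  (low-nibble mask = val mod 16 in Python; exact)
      let v := PySem.Int.mod st.2 16
      let c := if v < 10 then Char.ofNat (48 + v).toNat else Char.ofNat (65 + (v - 10)).toNat
      -- val >>= 4  (arithmetic shift = floor division by 16; exact)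
      (st.1 ++ [c], PySem.Int.floordiv st.2 16))
    ([], val)
  String.mk st.1

-- ===== PORT B =====
def pvHexDigit (n : Nat) : Char := if n < 10 then Char.ofNat (48 + n) else Char.ofNat (55 + n)

-- format(n, 'X') : uppercase hex digits, most significant first (exact for n : Nat)
def pvHexMSB (n : Nat) : List Char :=
  if h : n < 16 then [pvHexDigit n]
  else pvHexMSB (n / 16) ++ [pvHexDigit (n % 16)]
  decreasing_by exact Nat.div_lt_self (by omega) (by omega)

def ToFilePart_alt (val : Int) : String :=
  -- masked = val & 0xFFFFFFFFFFFFFFFF  (= val mod 2^64 in Python; exact)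
  let masked := (PySem.Int.mod val (2 ^ 64)).toNat
  let s := pvHexMSB masked
  -- '016X' zero-pads on the left to width 16; [::-1] reverses
  String.mk (List.replicate (16 - s.length) '0' ++ s).reverse

-- ===== PRECONDITION & SPEC =====
def Spec_ToFilePart (val : Int) (out : String) : Prop := out = ToFilePart_alt val
instance (val : Int) (out : String) : Decidable (Spec_ToFilePart val out) := by unfold Spec_ToFilePart; infer_instance

-- ===== CLAIM (what is proved, stated in full; the proofs are below) =====
def Claim_equal_ToFilePart : Prop := ∀ (val : Int), Dom_ToFilePart val → Spec_ToFilePart val (ToFilePart val)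

-- ===== LEMMAS AND PROOFS =====

-- digits of v, least significant first, n of them (Int version, matching A's loop)
def pvIntLSB : Nat → Int → List Char
  | 0, _ => []
  | n + 1, v => pvHexDigit (v % 16).toNat :: pvIntLSB n (v / 16)

-- digits, least significant first, Nat version
def pvNatLSB : Nat → Nat → List Char
  | 0, _ => []
  | n + 1, m => pvHexDigit (m % 16) :: pvNatLSB n (m / 16)

theorem pvDigitA_eq (v : Int) (h0 : 0 ≤ v) (h16 : v < 16) :
    (if v < 10 then Char.ofNat (48 + v).toNat else Char.ofNat (65 + (v - 10)).toNat)
      = pvHexDigit v.toNat := by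
  interval_cases v <;> decide

theorem pvLoop_eq (l : List Int) : ∀ (acc : List Char) (v : Int),
    (l.foldl
      (fun (st : List Char × Int) _ =>
        let w := PySem.Int.mod st.2 16
        let c := if w < 10 then Char.ofNat (48 + w).toNat else Char.ofNat (65 + (w - 10)).toNat
        (st.1 ++ [c], PySem.Int.floordiv st.2 16))
      (acc, v)).1 = acc ++ pvIntLSB l.length v := by
  induction l with
  | nil => intro acc v; simp [pvIntLSB]
  | cons a l ih =>
    intro acc v
    have hm : PySem.Int.mod v 16 = v % 16 := PySem.Int.mod_eq_emod_of_pos (by norm_num)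
    have hd : PySem.Int.floordiv v 16 = v / 16 := PySem.Int.floordiv_eq_ediv_of_pos (by norm_num)
    simp only [List.foldl_cons, ih, List.length_cons, pvIntLSB, hm, hd]
    rw [pvDigitA_eq (v % 16) (Int.emod_nonneg v (by norm_num)) (Int.emod_lt_of_pos v (by norm_num))]
    simp

theorem pvIntLSB_congr : ∀ (n : Nat) (v w : Int),
    v % (16 : Int) ^ n = w % (16 : Int) ^ n → pvIntLSB n v = pvIntLSB n w := by
  intro n
  induction n with
  | zero => intro v w _; rfl
  | succ n ih =>
    intro v w h
    have hdvd : (16 : Int) ∣ (16 : Int) ^ (n + 1) := dvd_pow_self 16 (Nat.succ_ne_zero n)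
    have h16 : v % 16 = w % 16 := by
      rw [← Int.emod_emod_of_dvd v hdvd, ← Int.emod_emod_of_dvd w hdvd, h]
    obtain ⟨k, hk⟩ : (16 : Int) ^ (n + 1) ∣ w - v := Int.ModEq.dvd h
    have hw : w = v + (16 ^ n * k) * 16 := by
      have : w = v + 16 ^ (n + 1) * k := by omega
      rw [this]; ring
    have hq : (v / 16) % (16 : Int) ^ n = (w / 16) % (16 : Int) ^ n := by
      rw [hw, Int.add_mul_ediv_right _ _ (by norm_num : (16:Int) ≠ 0),
          Int.add_mul_emod_self_left]
    simp only [pvIntLSB, h16, ih _ _ hq]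

theorem pvIntLSB_ofNat : ∀ (n : Nat) (m : Nat), pvIntLSB n (m : Int) = pvNatLSB n m := by
  intro n
  induction n with
  | zero => intro m; rfl
  | succ n ih =>
    intro m
    have h1 : ((m : Int) % 16).toNat = m % 16 := by omega
    have h2 : (m : Int) / 16 = ((m / 16 : Nat) : Int) := by omega
    simp only [pvIntLSB, pvNatLSB, h1, h2, ih]

theorem pvNatLSB_zero : ∀ (n : Nat), pvNatLSB n 0 = List.replicate n '0' := by
  intro n
  induction n with
  | zero => rfl
  | succ n ih => simp only [pvNatLSB, Nat.zero_mod, Nat.zero_div, ih]; rfl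

theorem pvNatLSB_eq_hex : ∀ (n m : Nat), m < 16 ^ n → 1 ≤ n →
    pvNatLSB n m = (pvHexMSB m).reverse ++ List.replicate (n - (pvHexMSB m).length) '0' := by
  intro n
  induction n with
  | zero => intro m _ h; omega
  | succ n ih =>
    intro m hlt _
    by_cases h16 : m < 16
    · rw [pvHexMSB, dif_pos h16]
      simp only [pvNatLSB, Nat.mod_eq_of_lt h16, Nat.div_eq_of_lt h16, pvNatLSB_zero,
        List.length_cons, List.length_nil, List.reverse_cons, List.reverse_nil]
      simp
    · rw [pvHexMSB, dif_neg h16]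
      have hq : m / 16 < 16 ^ n := by
        rw [Nat.div_lt_iff_lt_mul (by omega)]
        calc m < 16 ^ (n + 1) := hlt
          _ = 16 ^ n * 16 := by ring
      have hn : 1 ≤ n := by
        by_contra hc
        have : n = 0 := by omega
        subst this; simp at hlt; omega
      simp only [pvNatLSB, List.reverse_append, List.reverse_cons, List.reverse_nil,
        List.length_append, List.length_cons, List.length_nil, ih (m / 16) hq hn]
      have : n + 1 - ((pvHexMSB (m / 16)).length + 0 + 1) = n - (pvHexMSB (m / 16)).length := by
        omega
      rw [this]
      simp

-- ===== VERDICT (by name: the statement is the Claim_ definition above) =====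
theorem ToFilePart_spec : Claim_equal_ToFilePart := by
  intro val _
  unfold Spec_ToFilePart ToFilePart ToFilePart_alt
  dsimp only
  have hlen : (PySem.List.pyRange 0 16 1).length = 16 := by decide
  rw [pvLoop_eq, hlen]
  have hmod : PySem.Int.mod val (2 ^ 64) = val % (2 ^ 64) := PySem.Int.mod_eq_emod_of_pos (by norm_num)
  set m : Nat := (PySem.Int.mod val (2 ^ 64)).toNat with hm
  have hpos : (0:Int) < 2 ^ 64 := by norm_num
  have hnn : 0 ≤ val % (2 ^ 64) := Int.emod_nonneg val (by norm_num)
  have hmInt : (m : Int) = val % (2 ^ 64) := by rw [hm, hmod, Int.toNat_of_nonneg hnn]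
  have hmlt : m < 16 ^ 16 := by
    have : val % (2 ^ 64) < 2 ^ 64 := Int.emod_lt_of_pos val hpos
    have h2 : (m : Int) < 2 ^ 64 := by rw [hmInt]; exact this
    have : m < 2 ^ 64 := by exact_mod_cast h2
    omega
  have hcongr : val % (16 : Int) ^ 16 = (m : Int) % (16 : Int) ^ 16 := by
    have h1 : (16 : Int) ^ 16 = 2 ^ 64 := by norm_num
    rw [h1, hmInt, Int.emod_emod_of_dvd _ dvd_rfl]
  rw [pvIntLSB_congr 16 val (m : Int) hcongr, pvIntLSB_ofNat,
      pvNatLSB_eq_hex 16 m hmlt (by omega)]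
  simp [List.reverse_append]
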